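-- pv_equiv track=rewrite | github.com/benjaortizq/ITCR | Menus31_BenjaminOrtiz.py | AgregarDigito
-- ===== SOURCE A (Python) =====
-- def AgregarDigito (cantidad, digito ) :
--     resultado = 0
--     exponente = 0
--     while cantidad > 0 :
--         digito_resultado = (cantidad %10 ) + digito
--         if digito_resultado > 9 :
--             digito_resultado%=10
--         resultado = (resultado )+ (digito_resultado * (10**exponente))
--         exponente+=1
--         cantidad//=10
--     return resultado
-- ===== SOURCE B (Python) =====
-- def AgregarDigito(cantidad, digito):
--     if cantidad <= 0:
--         return 0
--     resultado = 0
--     for c in str(cantidad):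
--         t = int(c) + digito
--         if t > 9:
--             t %= 10
--         resultado = resultado * 10 + t
--     return resultado
-- ===== Notes on version B (the rewrite author's own statement) =====
-- stated objective: idiomatic
-- what changed: B converts the number to its decimal string once and folds over it left-to-right with Horner accumulation (resultado*10+t), instead of A's arithmetic right-to-left digit peeling with an explicit exponent and 10**exponente per step.
import Mathlib
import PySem

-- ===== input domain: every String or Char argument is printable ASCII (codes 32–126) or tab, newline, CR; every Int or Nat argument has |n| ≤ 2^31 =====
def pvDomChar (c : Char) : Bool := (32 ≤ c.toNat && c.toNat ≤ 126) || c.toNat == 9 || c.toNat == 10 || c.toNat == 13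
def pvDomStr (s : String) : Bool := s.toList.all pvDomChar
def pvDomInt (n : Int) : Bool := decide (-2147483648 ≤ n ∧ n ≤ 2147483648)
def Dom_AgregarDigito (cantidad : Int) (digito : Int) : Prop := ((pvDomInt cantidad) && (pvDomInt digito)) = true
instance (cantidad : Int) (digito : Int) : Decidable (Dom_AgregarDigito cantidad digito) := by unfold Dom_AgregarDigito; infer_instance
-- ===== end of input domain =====

-- B replaces A's arithmetic right-to-left digit peeling (with 10**exponente) by a single
-- str() conversion and a left-to-right Horner fold over the digit characters (idiomatic rewrite).


-- ===== PORT A =====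
-- the while-loop of A, state (resultado, exponente, cantidad); 10**exponente is
-- 10 ^ exponente.toNat (exponente starts at 0 and only increments, so it is never negative)
def pvALoop (digito resultado exponente cantidad : Int) : Int :=
  if cantidad > 0 then
    let dr := PySem.Int.mod cantidad 10 + digito
    let dr := if dr > 9 then PySem.Int.mod dr 10 else dr
    pvALoop digito (resultado + dr * 10 ^ exponente.toNat) (exponente + 1) (PySem.Int.floordiv cantidad 10)
  else resultado
termination_by cantidad.toNat
decreasing_by
  simp only [PySem.Int.floordiv, Int.fdiv_eq_ediv]
  omega

def AgregarDigito (cantidad : Int) (digito : Int) : Int :=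
  pvALoop digito 0 0 cantidad

-- ===== PORT B =====
-- int(c) for a single character c: exact for the decimal digit characters that
-- str(cantidad) produces when cantidad > 0
def pvDigitVal (c : Char) : Int := (c.toNat : Int) - 48

-- body of B's for-loop: t = int(c) + digito; if t > 9: t %= 10; resultado = resultado*10 + t
def pvStep (digito resultado : Int) (c : Char) : Int :=
  let t := pvDigitVal c + digito
  let t := if t > 9 then PySem.Int.mod t 10 else t
  resultado * 10 + t

def AgregarDigito_alt (cantidad : Int) (digito : Int) : Int :=
  if cantidad ≤ 0 then 0
  else (PySem.Int.toStr cantidad).toList.foldl (pvStep digito) 0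

-- ===== PRECONDITION & SPEC =====
def Spec_AgregarDigito (cantidad : Int) (digito : Int) (out : Int) : Prop := out = AgregarDigito_alt cantidad digito
instance (cantidad : Int) (digito : Int) (out : Int) : Decidable (Spec_AgregarDigito cantidad digito out) := by unfold Spec_AgregarDigito; infer_instance

-- ===== CLAIM (what is proved, stated in full; the proofs are below) =====
def Claim_equal_AgregarDigito : Prop := ∀ (cantidad : Int) (digito : Int), Dom_AgregarDigito cantidad digito → Spec_AgregarDigito cantidad digito (AgregarDigito cantidad digito)

-- ===== LEMMAS AND PROOFS =====

-- the per-digit transform both programs apply to a digit value d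
def pvF (digito d : Int) : Int :=
  let t := d + digito
  if t > 9 then PySem.Int.mod t 10 else t

-- Horner value of the transformed digits of n
def pvV (digito : Int) (n : Nat) : Int :=
  if n < 10 then pvF digito n
  else pvV digito (n / 10) * 10 + pvF digito (n % 10)
termination_by n
decreasing_by omega

-- number of decimal digits of n (counting 1 for n = 0)
def pvLen (n : Nat) : Nat :=
  if n < 10 then 1 else pvLen (n / 10) + 1
termination_by n
decreasing_by omega

theorem pvStep_eq (digito r : Int) (c : Char) :
    pvStep digito r c = r * 10 + pvF digito (pvDigitVal c) := rfl

theorem pvDigitVal_digitChar (d : Nat) (h : d < 10) :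
    pvDigitVal (Nat.digitChar d) = (d : Int) := by
  interval_cases d <;> decide

-- A's loop computes r + pvV(n) * 10^e for a positive cantidad n
theorem pvALoop_eq (digito : Int) (n : Nat) (hn : 0 < n) :
    ∀ (r : Int) (e : Nat), pvALoop digito r (e : Int) (n : Int) = r + pvV digito n * 10 ^ e := by
  induction n using Nat.strong_induction_on with
  | _ n ih =>
    intro r e
    rw [pvALoop]
    have hpos : ((n : Int) > 0) := by exact_mod_cast hn
    simp only [hpos, if_true]
    have hmod : PySem.Int.mod (n : Int) 10 = ((n % 10 : Nat) : Int) := by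
      simp [PySem.Int.mod, Int.fmod_eq_emod]
    have hdiv : PySem.Int.floordiv (n : Int) 10 = ((n / 10 : Nat) : Int) := by
      simp [PySem.Int.floordiv, Int.fdiv_eq_ediv]
    have htoNat : ((e : Int)).toNat = e := by omega
    have hsucc : ((e : Int)) + 1 = ((e + 1 : Nat) : Int) := by simp
    rw [hmod, hdiv, htoNat, hsucc]
    by_cases hsmall : n < 10
    · have h0 : ((n / 10 : Nat) : Int) = ((0 : Nat) : Int) := by
        congr 1; omega
      rw [h0, pvALoop]
      have hm : n % 10 = n := by omega
      rw [pvV, if_pos hsmall, hm]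
      simp [pvF]
    · have hd : 0 < n / 10 := by omega
      rw [ih (n / 10) (by omega) hd _ (e + 1)]
      have hV : pvV digito n = pvV digito (n / 10) * 10 + pvF digito ((n % 10 : Nat) : Int) := by
        rw [pvV, if_neg hsmall]; push_cast; ring_nf
      rw [hV]
      simp only [pvF]
      ring

-- the Horner fold over the digit characters produced by Nat.toDigitsCore
theorem pvFold_toDigitsCore (digito : Int) :
    ∀ (fuel n : Nat), n < fuel → ∀ (ds : List Char) (acc : Int),
      List.foldl (pvStep digito) acc (Nat.toDigitsCore 10 fuel n ds)
        = List.foldl (pvStep digito) (acc * 10 ^ pvLen n + pvV digito n) ds := by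
  intro fuel
  induction fuel with
  | zero => intro n h; omega
  | succ fuel ih =>
    intro n h ds acc
    rw [Nat.toDigitsCore]
    by_cases h0 : n / 10 = 0
    · have hsmall : n < 10 := by omega
      simp only [h0, if_true]
      rw [List.foldl_cons, pvStep_eq,
        pvDigitVal_digitChar (n % 10) (by omega)]
      have hm : n % 10 = n := by omega
      have hL : pvLen n = 1 := by rw [pvLen, if_pos hsmall]
      have hV : pvV digito n = pvF digito n := by rw [pvV, if_pos hsmall]
      rw [hL, hV, hm]; ring_nf
    · have hge : 10 ≤ n := by omega
      simp only [h0, if_false]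
      rw [ih (n / 10) (by omega) _ acc, List.foldl_cons, pvStep_eq,
        pvDigitVal_digitChar (n % 10) (by omega)]
      have hL : pvLen n = pvLen (n / 10) + 1 := by
        rw [pvLen, if_neg (by omega : ¬ n < 10)]
      have hV : pvV digito n = pvV digito (n / 10) * 10 + pvF digito ((n % 10 : Nat) : Int) := by
        rw [pvV, if_neg (by omega : ¬ n < 10)]; push_cast; ring_nf
      rw [hL, hV]; ring_nf

-- ===== VERDICT (by name: the statement is the Claim_ definition above) =====
theorem AgregarDigito_spec : Claim_equal_AgregarDigito := by
  intro cantidad digito _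
  unfold Spec_AgregarDigito AgregarDigito AgregarDigito_alt
  by_cases hpos : cantidad ≤ 0
  · rw [if_pos hpos, pvALoop, if_neg (by omega)]
  · rw [if_neg hpos]
    have hc : cantidad = ((cantidad.toNat : Nat) : Int) := by omega
    have hn : 0 < cantidad.toNat := by omega
    rw [PySem.Int.toList_toStr]
    have hchars : PySem.Int.toChars cantidad = Nat.toDigits 10 cantidad.toNat := by
      simp [PySem.Int.toChars, if_neg (by omega : ¬ cantidad < 0)]
    rw [hchars, Nat.toDigits,
      pvFold_toDigitsCore digito (cantidad.toNat + 1) cantidad.toNat (by omega) [] 0]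
    rw [List.foldl_nil]
    have : (0 : Int) * 10 ^ pvLen cantidad.toNat = 0 := by ring
    rw [this, zero_add]
    conv_lhs => rw [hc]
    simpa using pvALoop_eq digito cantidad.toNat hn 0 0
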